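-- pv_equiv track=rewrite | github.com/khj1998/ProblemSolving | 프로그래머스/unrated/142085. 디펜스 게임/디펜스 게임.py | solution
-- ===== SOURCE A (Python) =====
-- import heapq
--
-- def solution(n, k, enemy):
--     answer = 0
--     q = []
--
--     for e_num in enemy:
--         n -= e_num
--
--         if n<0:
--             if k == 0:
--                 break
--             else:
--                 num = heapq.heappushpop(q,-e_num)
--                 n -= num
--                 k-=1
--                 answer+=1
--         else:
--             heapq.heappush(q,-e_num)
--             answer+=1
--
--     return answer
-- ===== SOURCE B (Python) =====
-- def solution(n, k, enemy):
--     # Same lazy-refund greedy as the problem demands, but organised as a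
--     # two-phase loop with a batch-sorted pool instead of a streaming heap:
--     # paid-for waves land in an unsorted buffer (with its running maximum);
--     # only when a refund actually needs a buffered wave is the buffer sorted
--     # into the ascending base, whose last element is always the pop candidate.
--     # Once the immunities run out, a plain prefix walk finishes the count.
--     base = []           # ascending; base[-1] is the largest consolidated wave
--     buf = []            # unsorted recent survivors
--     bufmax = None       # max(buf), or None when buf is empty
--     i, m = 0, len(enemy)
--     while i < m and k != 0:          # phase 1: immunities remain
--         e = enemy[i]
--         if n >= e:
--             n -= e
--             buf.append(e)
--             if bufmax is None or e > bufmax: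
--                 bufmax = e
--         else:
--             if bufmax is not None and (not base or bufmax > base[-1]):
--                 base += buf          # consolidate: the refund candidate is buffered
--                 base.sort()
--                 buf = []
--                 bufmax = None
--             if base and base[-1] > e:
--                 big = base.pop()     # refund the largest paid-for wave
--                 buf.append(e)
--                 if bufmax is None or e > bufmax:
--                     bufmax = e
--             else:
--                 big = e              # current wave is (one of) the largest
--             n += big - e
--             k -= 1
--         i += 1
--     while i < m and n >= enemy[i]:   # phase 2: out of immunities
--         n -= enemy[i]
--         i += 1
--     return i
-- ===== Notes on version B (the rewrite author's own statement) =====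
-- stated objective: alternative
-- what changed: Keeps A's exact lazy-refund decision rule (a bisection/prefix-feasibility rewrite is not equivalent here: negative enemy values make feasibility non-monotone) but replaces A's negated min-heap streaming loop with a two-phase scan: paid waves go into an unsorted buffer with a cached maximum, consolidated into a batch-sorted base list only when a refund needs a buffered wave (the base's last element is the pop candidate), and once immunities are exhausted a plain prefix walk with no bookkeeping finishes the count.
import Mathlib
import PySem

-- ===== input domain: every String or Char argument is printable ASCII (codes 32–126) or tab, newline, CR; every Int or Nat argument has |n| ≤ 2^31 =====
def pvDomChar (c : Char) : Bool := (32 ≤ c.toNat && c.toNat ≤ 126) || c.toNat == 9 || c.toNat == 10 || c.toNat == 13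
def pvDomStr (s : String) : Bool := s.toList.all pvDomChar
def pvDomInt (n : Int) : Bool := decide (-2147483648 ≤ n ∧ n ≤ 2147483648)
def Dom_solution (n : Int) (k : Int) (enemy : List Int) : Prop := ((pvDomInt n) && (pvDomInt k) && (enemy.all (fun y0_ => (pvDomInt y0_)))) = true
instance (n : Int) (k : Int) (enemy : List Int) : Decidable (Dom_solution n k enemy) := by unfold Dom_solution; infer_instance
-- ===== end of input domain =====

-- B replaces A's negated min-heap streaming loop by a two-phase scan whose refund candidates
-- live in a batch-sorted base list plus an unsorted buffer with a cached maximum (consolidated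
-- only when a refund needs a buffered wave); once immunities run out, a plain prefix walk
-- finishes.  A prefix-feasibility/bisection rewrite would NOT be equivalent on this domain
-- (negative enemy values make feasibility non-monotone), so B keeps A's exact lazy semantics.

-- ===== PORT A =====
-- heapq is modelled by the multiset of stored items (a heap is observable only through its
-- minimum): heappushpop pushes x and removes/returns the minimum — exact for A, whose heap
-- is only ever read through heappushpop.
def pyHeapMin : List Int → Int
  | [] => 0
  | x :: xs => xs.foldl min x

def heapPushPop (q : List Int) (x : Int) : Int × List Int :=
  let q1 := q ++ [x]
  let m := pyHeapMin q1
  (m, q1.erase m)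

def solutionLoop : List Int → Int → Int → List Int → Int → Int
  | [], _, _, _, answer => answer
  | e :: rest, n, k, q, answer =>
    let n1 := n - e
    if n1 < 0 then
      if k = 0 then answer                                  -- break
      else
        let p := heapPushPop q (-e)
        solutionLoop rest (n1 - p.1) (k - 1) p.2 (answer + 1)
    else
      solutionLoop rest n1 k (q ++ [-e]) (answer + 1)

def solution (n : Int) (k : Int) (enemy : List Int) : Int :=
  solutionLoop enemy n k [] 0

-- ===== PORT B =====
-- "buf.append(e); if bufmax is None or e > bufmax: bufmax = e"
def bmUpd (bm : Option Int) (e : Int) : Option Int :=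
  match bm with
  | none => some e
  | some v => if v < e then some e else some v

-- the consolidation block of the dip branch:
-- "if bufmax is not None and (not base or bufmax > base[-1]): base += buf; base.sort(); buf = []; bufmax = None"
def consolidate (base buf : List Int) (bufmax : Option Int) : List Int × List Int × Option Int :=
  match bufmax, base.getLast? with
  | some _, none => ((base ++ buf).mergeSort (· ≤ ·), [], none)
  | some v, some b =>
    if b < v then ((base ++ buf).mergeSort (· ≤ ·), [], none) else (base, buf, bufmax)
  | none, _ => (base, buf, bufmax)

-- phase 1 (immunities remain): returns (rounds survived, remaining budget, remaining waves)
def phase1 : List Int → Int → Int → List Int → List Int → Option Int → Int × Int × List Int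
  | [], n, _, _, _, _ => (0, n, [])
  | e :: rest, n, k, base, buf, bufmax =>
    if k = 0 then (0, n, e :: rest)
    else if e ≤ n then
      let r := phase1 rest (n - e) k base (buf ++ [e]) (bmUpd bufmax e)
      (r.1 + 1, r.2)
    else
      -- "if bufmax is not None and (not base or bufmax > base[-1]): base += buf; base.sort(); …"
      let s := consolidate base buf bufmax
      -- "if base and base[-1] > e: big = base.pop(); buf.append(e) … else: big = e"
      match s.1.getLast? with
      | some b =>
        if e < b then
          let r := phase1 rest (n + (b - e)) (k - 1) s.1.dropLast (s.2.1 ++ [e]) (bmUpd s.2.2 e)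
          (r.1 + 1, r.2)
        else
          let r := phase1 rest (n + (e - e)) (k - 1) s.1 s.2.1 s.2.2
          (r.1 + 1, r.2)
      | none =>
        let r := phase1 rest (n + (e - e)) (k - 1) s.1 s.2.1 s.2.2
        (r.1 + 1, r.2)

-- phase 2 (out of immunities): plain prefix walk
def phase2 : List Int → Int → Int
  | [], _ => 0
  | e :: rest, n => if e ≤ n then 1 + phase2 rest (n - e) else 0

def solution_alt (n : Int) (k : Int) (enemy : List Int) : Int :=
  let r := phase1 enemy n k [] [] none
  r.1 + phase2 r.2.2 r.2.1

-- ===== PRECONDITION & SPEC =====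
def Spec_solution (n : Int) (k : Int) (enemy : List Int) (out : Int) : Prop := out = solution_alt n k enemy
instance (n : Int) (k : Int) (enemy : List Int) (out : Int) : Decidable (Spec_solution n k enemy out) := by unfold Spec_solution; infer_instance

-- ===== CLAIM (what is proved, stated in full; the proofs are below) =====
def Claim_equal_solution : Prop := ∀ (n : Int) (k : Int) (enemy : List Int), Dom_solution n k enemy → Spec_solution n k enemy (solution n k enemy)

-- ===== LEMMAS AND PROOFS =====

-- bufmax caches the maximum of buf (and is none exactly when buf is empty)
def BufMax (buf : List Int) (bm : Option Int) : Prop :=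
  (bm = none ∧ buf = []) ∨ ∃ v, bm = some v ∧ v ∈ buf ∧ ∀ x ∈ buf, x ≤ v

theorem bufMax_nil : BufMax [] none := Or.inl ⟨rfl, rfl⟩

theorem bufMax_upd (buf : List Int) (bm : Option Int) (e : Int) (h : BufMax buf bm) :
    BufMax (buf ++ [e]) (bmUpd bm e) := by
  rcases h with ⟨hbm, hbuf⟩ | ⟨v, hbm, hv, hub⟩
  · subst hbm hbuf
    exact Or.inr ⟨e, rfl, by simp, by simp⟩
  · subst hbm
    by_cases hlt : v < e
    · refine Or.inr ⟨e, by simp [bmUpd, hlt], by simp, ?_⟩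
      intro x hx
      rcases List.mem_append.mp hx with h | h
      · exact le_of_lt (lt_of_le_of_lt (hub x h) hlt)
      · simp at h; omega
    · refine Or.inr ⟨v, by simp [bmUpd, hlt], List.mem_append.mpr (Or.inl hv), ?_⟩
      intro x hx
      rcases List.mem_append.mp hx with h | h
      · exact hub x h
      · simp at h; omega

theorem foldl_min_init_le (xs : List Int) : ∀ a : Int, xs.foldl min a ≤ a := by
  induction xs with
  | nil => intro a; simp
  | cons x xs ih =>
    intro a
    simp only [List.foldl]
    exact le_trans (ih (min a x)) (min_le_left a x)

theorem foldl_min_mem (xs : List Int) : ∀ a : Int, xs.foldl min a = a ∨ xs.foldl min a ∈ xs := by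
  induction xs with
  | nil => intro a; exact Or.inl rfl
  | cons x xs ih =>
    intro a
    simp only [List.foldl]
    rcases ih (min a x) with h | h
    · rcases min_choice a x with h2 | h2
      · exact Or.inl (h.trans h2)
      · exact Or.inr (by rw [h, h2]; exact List.mem_cons_self)
    · exact Or.inr (List.mem_cons_of_mem _ h)

theorem foldl_min_le (xs : List Int) : ∀ (a y : Int), y ∈ xs → xs.foldl min a ≤ y := by
  induction xs with
  | nil => intro a y hy; cases hy
  | cons x xs ih =>
    intro a y hy
    simp only [List.foldl]
    rcases List.mem_cons.mp hy with h | h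
    · exact le_trans (foldl_min_init_le xs (min a x)) (h ▸ min_le_right a x)
    · exact ih (min a x) y h

theorem pyHeapMin_mem (l : List Int) (h : l ≠ []) : pyHeapMin l ∈ l := by
  cases l with
  | nil => exact absurd rfl h
  | cons x xs =>
    simp only [pyHeapMin]
    rcases foldl_min_mem xs x with h2 | h2
    · rw [h2]; exact List.mem_cons_self
    · exact List.mem_cons_of_mem _ h2

theorem pyHeapMin_le (l : List Int) : ∀ y ∈ l, pyHeapMin l ≤ y := by
  cases l with
  | nil => intro y hy; cases hy
  | cons x xs =>
    intro y hy
    simp only [pyHeapMin]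
    rcases List.mem_cons.mp hy with h | h
    · exact h ▸ foldl_min_init_le xs x
    · exact foldl_min_le xs x y h

theorem pyHeapMin_eq (l : List Int) (m : Int) (hm : m ∈ l) (hle : ∀ y ∈ l, m ≤ y) :
    pyHeapMin l = m :=
  le_antisymm (pyHeapMin_le l m hm) (hle _ (pyHeapMin_mem l (List.ne_nil_of_mem hm)))

theorem mergeSort_perm' (l : List Int) : (l.mergeSort (· ≤ ·)).Perm l :=
  List.mergeSort_perm l _

theorem mergeSort_pairwise (l : List Int) : (l.mergeSort (· ≤ ·)).Pairwise (· ≤ ·) := by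
  have := List.pairwise_mergeSort (le := fun (a b : Int) => decide (a ≤ b))
    (by intro a b c; simp; omega) (by intro a b; simp; omega) l
  simpa using this

theorem loop_k_zero (rest : List Int) :
    ∀ (n : Int) (q : List Int) (answer : Int),
      solutionLoop rest n 0 q answer = answer + phase2 rest n := by
  induction rest with
  | nil => intro n q answer; simp [solutionLoop, phase2]
  | cons e rest ih =>
    intro n q answer
    by_cases h : n - e < 0
    · have h2 : ¬ (e ≤ n) := by omega
      simp [solutionLoop, phase2, h, h2]
    · have h2 : e ≤ n := by omega
      simp only [solutionLoop, phase2, if_neg h, if_pos h2]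
      rw [ih (n - e) (q ++ [-e]) (answer + 1)]
      omega

-- the consolidation step: multiset preserved, base sorted, buffer bounded by base's last
theorem sorted_last_max (l' : List Int) (b : Int)
    (hs : (l' ++ [b]).Pairwise (· ≤ ·)) : ∀ x ∈ l' ++ [b], x ≤ b := by
  intro x hx
  rcases List.mem_append.mp hx with h | h
  · exact (List.pairwise_append.mp hs).2.2 x h b (List.mem_singleton.mpr rfl)
  · exact (List.mem_singleton.mp h) ▸ le_refl b

theorem merge_step (base buf : List Int) (bufmax : Option Int)
    (hbase : base.Pairwise (· ≤ ·)) (hbm : BufMax buf bufmax) :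
    ((consolidate base buf bufmax).1 ++ (consolidate base buf bufmax).2.1).Perm (base ++ buf) ∧
      (consolidate base buf bufmax).1.Pairwise (· ≤ ·) ∧
      BufMax (consolidate base buf bufmax).2.1 (consolidate base buf bufmax).2.2 ∧
      (∀ b, (consolidate base buf bufmax).1.getLast? = some b →
        ∀ x ∈ (consolidate base buf bufmax).2.1, x ≤ b) ∧
      ((consolidate base buf bufmax).1.getLast? = none → (consolidate base buf bufmax).2.1 = []) := by
  rcases hbm with ⟨hbm0, hbuf0⟩ | ⟨v, hbm0, hv, hub⟩
  · subst hbm0 hbuf0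
    have hc : consolidate base [] none = (base, [], none) := by
      unfold consolidate
      cases base.getLast? <;> rfl
    rw [hc]
    exact ⟨by simp, hbase, bufMax_nil, by simp, fun _ => rfl⟩
  · subst hbm0
    cases hlast : base.getLast? with
    | none =>
      have hbase0 : base = [] := List.getLast?_eq_none_iff.mp hlast
      subst hbase0
      have hc : consolidate [] buf (some v) = (buf.mergeSort (· ≤ ·), [], none) := by
        unfold consolidate
        simp
      rw [hc]
      exact ⟨by simpa using mergeSort_perm' buf, by simpa using mergeSort_pairwise buf,
        bufMax_nil, by simp, fun _ => rfl⟩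
    | some b =>
      by_cases hlt : b < v
      · have hc : consolidate base buf (some v) = ((base ++ buf).mergeSort (· ≤ ·), [], none) := by
          unfold consolidate
          rw [hlast]
          simp [hlt]
        rw [hc]
        exact ⟨by simpa using mergeSort_perm' (base ++ buf), mergeSort_pairwise _,
          bufMax_nil, by simp, fun _ => rfl⟩
      · have hc : consolidate base buf (some v) = (base, buf, some v) := by
          unfold consolidate
          rw [hlast]
          simp [hlt]
        rw [hc]
        refine ⟨List.Perm.refl _, hbase, Or.inr ⟨v, rfl, hv, hub⟩, ?_, ?_⟩
        · intro b' hb' x hx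
          rw [hlast] at hb'
          have h1 : v ≤ b := not_lt.mp hlt
          have h2 := hub x hx
          injection hb' with hb'
          omega
        · intro h
          rw [hlast] at h
          simp at h

theorem loop_main (rest : List Int) :
    ∀ (n k : Int) (q base buf : List Int) (bufmax : Option Int) (answer : Int),
      q.Perm ((base ++ buf).map (fun z => -z)) → base.Pairwise (· ≤ ·) → BufMax buf bufmax →
      solutionLoop rest n k q answer =
        answer + ((phase1 rest n k base buf bufmax).1 +
          phase2 (phase1 rest n k base buf bufmax).2.2 (phase1 rest n k base buf bufmax).2.1) := by
  induction rest with
  | nil => intro n k q base buf bufmax answer hq hbase hbm; simp [solutionLoop, phase1, phase2]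
  | cons e rest ih =>
    intro n k q base buf bufmax answer hq hbase hbm
    by_cases hk : k = 0
    · subst hk
      rw [loop_k_zero]
      simp [phase1]
    · by_cases he : e ≤ n
      · -- survivable wave: A pushes -e, B appends e to the buffer
        have hnot : ¬ (n - e < 0) := by omega
        have hq' : (q ++ [-e]).Perm ((base ++ (buf ++ [e])).map (fun z => -z)) := by
          have h1 := List.Perm.append_right [-e] hq
          have h2 : ((base ++ buf).map (fun z => -z)) ++ [-e]
              = (base ++ (buf ++ [e])).map (fun z => -z) := by simp
          exact h2 ▸ h1
        simp only [solutionLoop, phase1, if_neg hnot, if_neg hk, if_pos he]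
        rw [ih (n - e) k (q ++ [-e]) base (buf ++ [e]) (bmUpd bufmax e) (answer + 1) hq' hbase
          (bufMax_upd buf bufmax e hbm)]
        omega
      · -- shortfall: consolidate if needed, then refund the largest wave (or e itself)
        have hneg : n - e < 0 := by omega
        obtain ⟨hps, hbs, hbms, hbbs, hbes⟩ := merge_step base buf bufmax hbase hbm
        have hqK : q.Perm (((consolidate base buf bufmax).1 ++ (consolidate base buf bufmax).2.1).map
            (fun z => -z)) := hq.trans ((hps.map (fun z => -z)).symm)
        cases hbl : (consolidate base buf bufmax).1.getLast? with
        | none =>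
          have hb1 : (consolidate base buf bufmax).1 = [] := List.getLast?_eq_none_iff.mp hbl
          have hb2 : (consolidate base buf bufmax).2.1 = [] := hbes hbl
          have hq0 : q = [] := by
            rw [hb1, hb2] at hqK
            exact (by simpa using hqK : q.Perm []).eq_nil
          subst hq0
          have h1 : pyHeapMin [-e] = -e := rfl
          have h2 : [-e].erase (-e) = ([] : List Int) := by simp
          have harg : n - e - -e = n + (e - e) := by ring
          simp only [solutionLoop, heapPushPop, phase1, if_pos hneg, if_neg hk, if_neg he,
            hbl, List.nil_append]
          rw [h1, h2, harg]
          rw [ih (n + (e - e)) (k - 1) [] (consolidate base buf bufmax).1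
            (consolidate base buf bufmax).2.1 (consolidate base buf bufmax).2.2 (answer + 1)
            (by rw [hb1, hb2]; simp) hbs hbms]
          omega
        | some b =>
          obtain ⟨l', hl'⟩ := List.getLast?_eq_some_iff.mp hbl
          have hmaxb : ∀ x ∈ (consolidate base buf bufmax).1, x ≤ b := by
            rw [hl']
            exact sorted_last_max l' b (hl' ▸ hbs)
          by_cases hel : e < b
          · -- refund b = the largest paid-for wave; e is paid and buffered
            have hmem : (-b) ∈ q ++ [-e] :=
              List.mem_append.mpr (Or.inl (hqK.mem_iff.mpr (List.mem_map.mpr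
                ⟨b, List.mem_append.mpr (Or.inl (hl' ▸ List.mem_append.mpr
                  (Or.inr (List.mem_singleton.mpr rfl)))), rfl⟩)))
            have hbound : ∀ y ∈ q ++ [-e], -b ≤ y := by
              intro y hy
              rcases List.mem_append.mp hy with h | h
              · obtain ⟨x, hx, rfl⟩ := List.mem_map.mp (hqK.mem_iff.mp h)
                rcases List.mem_append.mp hx with h' | h'
                · exact neg_le_neg (hmaxb x h')
                · exact neg_le_neg (hbbs b hbl x h')
              · rw [List.mem_singleton.mp h]; exact neg_le_neg (le_of_lt hel)
            have hmin : pyHeapMin (q ++ [-e]) = -b := pyHeapMin_eq _ _ hmem hbound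
            have hq' : ((q ++ [-e]).erase (-b)).Perm
                (((consolidate base buf bufmax).1.dropLast ++
                  ((consolidate base buf bufmax).2.1 ++ [e])).map (fun z => -z)) := by
              have hKsplit : ((consolidate base buf bufmax).1 ++ (consolidate base buf bufmax).2.1).map
                  (fun z => -z)
                  = l'.map (fun z => -z) ++ (-b) :: (consolidate base buf bufmax).2.1.map (fun z => -z) := by
                rw [hl']; simp
              have h1 : (q ++ [-e]).Perm ((-b) :: ((-e) :: (l'.map (fun z => -z) ++
                  (consolidate base buf bufmax).2.1.map (fun z => -z)))) := by
                refine (List.Perm.append_right [-e] hqK).trans ?_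
                rw [hKsplit]
                refine (List.perm_append_singleton _ _).trans ?_
                refine (List.Perm.cons _ List.perm_middle).trans ?_
                exact List.Perm.swap _ _ _
              have h2 := h1.erase (-b)
              rw [List.erase_cons_head] at h2
              refine h2.trans ?_
              have h3 : (((consolidate base buf bufmax).1.dropLast ++
                  ((consolidate base buf bufmax).2.1 ++ [e])).map (fun z => -z))
                  = (l'.map (fun z => -z) ++ (consolidate base buf bufmax).2.1.map (fun z => -z)) ++ [-e] := by
                rw [hl', List.dropLast_concat]; simp
              rw [h3]
              exact (List.perm_append_singleton _ _).symm
            have harg : n - e - pyHeapMin (q ++ [-e]) = n + (b - e) := by rw [hmin]; ring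
            have hds : (consolidate base buf bufmax).1.dropLast.Pairwise (· ≤ ·) :=
              hbs.sublist (List.dropLast_sublist _)
            simp only [solutionLoop, heapPushPop, phase1, if_pos hneg, if_neg hk, if_neg he,
              hbl, if_pos hel]
            rw [harg, hmin]
            rw [ih (n + (b - e)) (k - 1) ((q ++ [-e]).erase (-b))
              (consolidate base buf bufmax).1.dropLast ((consolidate base buf bufmax).2.1 ++ [e])
              (bmUpd (consolidate base buf bufmax).2.2 e) (answer + 1) hq' hds
              (bufMax_upd _ _ e hbms)]
            omega
          · -- e itself is (one of) the largest: the heap swap is a no-op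
            have hle : b ≤ e := not_lt.mp hel
            have hmem : (-e) ∈ q ++ [-e] := List.mem_append.mpr (Or.inr (List.mem_singleton.mpr rfl))
            have hbound : ∀ y ∈ q ++ [-e], -e ≤ y := by
              intro y hy
              rcases List.mem_append.mp hy with h | h
              · obtain ⟨x, hx, rfl⟩ := List.mem_map.mp (hqK.mem_iff.mp h)
                rcases List.mem_append.mp hx with h' | h'
                · exact neg_le_neg (le_trans (hmaxb x h') hle)
                · exact neg_le_neg (le_trans (hbbs b hbl x h') hle)
              · rw [List.mem_singleton.mp h]
            have hmin : pyHeapMin (q ++ [-e]) = -e := pyHeapMin_eq _ _ hmem hbound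
            have hq' : ((q ++ [-e]).erase (-e)).Perm
                (((consolidate base buf bufmax).1 ++ (consolidate base buf bufmax).2.1).map
                  (fun z => -z)) := by
              have h1 : (q ++ [-e]).Perm ((-e) :: ((consolidate base buf bufmax).1 ++
                  (consolidate base buf bufmax).2.1).map (fun z => -z)) :=
                (List.Perm.append_right [-e] hqK).trans (List.perm_append_singleton _ _)
              have h2 := h1.erase (-e)
              rw [List.erase_cons_head] at h2
              exact h2
            have harg : n - e - pyHeapMin (q ++ [-e]) = n + (e - e) := by rw [hmin]; ring
            simp only [solutionLoop, heapPushPop, phase1, if_pos hneg, if_neg hk, if_neg he,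
              hbl, if_neg hel]
            rw [harg, hmin]
            rw [ih (n + (e - e)) (k - 1) ((q ++ [-e]).erase (-e)) (consolidate base buf bufmax).1
              (consolidate base buf bufmax).2.1 (consolidate base buf bufmax).2.2 (answer + 1)
              hq' hbs hbms]
            omega

-- ===== VERDICT (by name: the statement is the Claim_ definition above) =====
theorem solution_spec : Claim_equal_solution := by
  intro n k enemy _
  show _ = _
  have h := loop_main enemy n k [] [] [] none 0 (by simp) (by simp) bufMax_nil
  simpa [solution, solution_alt] using h
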